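-- pv_equiv track=rewrite | github.com/Vise27/chat_boot | main.py | get_last_product_type
-- ===== SOURCE A (Python) =====
-- from typing import Dict, List, Optional, Tuple
--
-- def get_last_product_type(session_data: Dict) -> Optional[str]:
--     """Obtiene el tipo de producto de la última consulta exitosa"""
--     conversation = session_data.get("conversation", [])
--
--     # Buscar desde el final hacia el principio
--     for message in reversed(conversation):
--         # Si el mensaje tiene un tipo de producto específico (no continuation)
--         if message.get("product_type") and message.get("query_type") != "continuation":
--             return message["product_type"]
--
--     # Si no encuentra ninguno, buscar cualquier tipo de producto
--     for message in reversed(conversation):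
--         if message.get("product_type"):
--             return message["product_type"]
--
--     return None
-- ===== SOURCE B (Python) =====
-- def get_last_product_type(session_data):
--     """Obtiene el tipo de producto de la última consulta exitosa"""
--     fallback = None
--     for message in reversed(session_data.get("conversation", [])):
--         pt = message.get("product_type")
--         if pt:
--             if message.get("query_type") != "continuation":
--                 return pt
--             if fallback is None:
--                 fallback = pt
--     return fallback
-- ===== Notes on version B (the rewrite author's own statement) =====
-- stated objective: simpler
-- what changed: Replaces A's two reversed passes (preferred non-continuation scan, then any-product fallback scan) with a single reversed pass that returns a non-continuation product_type immediately and records the first product_type seen as a once-set fallback.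
import Mathlib
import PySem

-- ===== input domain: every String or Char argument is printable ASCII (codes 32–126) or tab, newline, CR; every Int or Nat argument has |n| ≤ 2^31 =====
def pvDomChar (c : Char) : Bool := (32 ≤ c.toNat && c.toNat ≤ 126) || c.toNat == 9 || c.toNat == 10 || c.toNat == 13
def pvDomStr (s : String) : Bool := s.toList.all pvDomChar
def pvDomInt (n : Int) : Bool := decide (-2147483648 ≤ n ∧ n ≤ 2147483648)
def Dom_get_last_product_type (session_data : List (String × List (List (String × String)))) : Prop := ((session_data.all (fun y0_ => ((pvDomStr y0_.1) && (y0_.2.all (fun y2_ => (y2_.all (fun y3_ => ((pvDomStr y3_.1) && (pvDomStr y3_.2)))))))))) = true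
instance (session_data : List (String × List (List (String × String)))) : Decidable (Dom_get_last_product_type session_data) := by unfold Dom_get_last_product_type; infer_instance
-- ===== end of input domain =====

-- B replaces A's two reversed passes with ONE reversed pass keeping a once-set fallback (objective: simpler).

-- ===== PORT A =====
-- first reversed loop: truthy product_type AND query_type != "continuation"
def pvLoopA1 : List (List (String × String)) → Option String
  | [] => none
  | m :: rest =>
    match (PySem.Dict.mk m).get? "product_type" with
    | some p =>
      if p ≠ "" ∧ (PySem.Dict.mk m).get? "query_type" ≠ some "continuation" then some p
      else pvLoopA1 rest
    | none => pvLoopA1 rest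

-- second reversed loop: any truthy product_type
def pvLoopA2 : List (List (String × String)) → Option String
  | [] => none
  | m :: rest =>
    match (PySem.Dict.mk m).get? "product_type" with
    | some p => if p ≠ "" then some p else pvLoopA2 rest
    | none => pvLoopA2 rest

def get_last_product_type (session_data : List (String × List (List (String × String)))) : Option String :=
  let conversation := (PySem.Dict.mk session_data).getD "conversation" []
  match pvLoopA1 conversation.reverse with
  | some p => some p
  | none => pvLoopA2 conversation.reverse

-- ===== PORT B =====
-- single reversed pass with a once-set fallback accumulator
def pvLoopB : List (List (String × String)) → Option String → Option String
  | [], fb => fb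
  | m :: rest, fb =>
    match (PySem.Dict.mk m).get? "product_type" with
    | some p =>
      if p ≠ "" then
        if (PySem.Dict.mk m).get? "query_type" ≠ some "continuation" then some p
        else pvLoopB rest (match fb with | none => some p | some f => some f)
      else pvLoopB rest fb
    | none => pvLoopB rest fb

def get_last_product_type_alt (session_data : List (String × List (List (String × String)))) : Option String :=
  pvLoopB ((PySem.Dict.mk session_data).getD "conversation" []).reverse none

-- ===== PRECONDITION & SPEC =====
def Spec_get_last_product_type (session_data : List (String × List (List (String × String)))) (out : Option String) : Prop := out = get_last_product_type_alt session_data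
instance (session_data : List (String × List (List (String × String)))) (out : Option String) : Decidable (Spec_get_last_product_type session_data out) := by unfold Spec_get_last_product_type; infer_instance

-- ===== CLAIM (what is proved, stated in full; the proofs are below) =====
def Claim_equal_get_last_product_type : Prop := ∀ (session_data : List (String × List (List (String × String)))), Dom_get_last_product_type session_data → Spec_get_last_product_type session_data (get_last_product_type session_data)

-- ===== LEMMAS AND PROOFS =====
lemma pvLoopB_eq (l : List (List (String × String))) :
    ∀ fb, pvLoopB l fb =
      match pvLoopA1 l with
      | some p => some p
      | none => match fb with | some f => some f | none => pvLoopA2 l := by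
  induction l with
  | nil => intro fb; cases fb <;> simp [pvLoopB, pvLoopA1, pvLoopA2]
  | cons m rest ih =>
    intro fb
    simp only [pvLoopB, pvLoopA1, pvLoopA2]
    cases h : (PySem.Dict.mk m).get? "product_type" with
    | none => exact ih fb
    | some p =>
      dsimp only
      by_cases hp : p = ""
      · simp [hp, ih fb]
      · by_cases hq : (PySem.Dict.mk m).get? "query_type" = some "continuation"
        · rw [if_pos hp, if_neg (not_not_intro hq), if_neg (fun hh => hh.2 hq)]
          cases fb with
          | none => rw [ih (some p)]; simp [hp]
          | some f => rw [ih (some f)]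
        · simp [hp, hq]

-- ===== VERDICT (by name: the statement is the Claim_ definition above) =====
theorem get_last_product_type_spec : Claim_equal_get_last_product_type := by
  intro sd _
  unfold Spec_get_last_product_type get_last_product_type get_last_product_type_alt
  rw [pvLoopB_eq]
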